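-- pv_equiv track=rewrite | github.com/schollm/docker-composer | src/docker_composer/_utils/argument.py | _collect_arguments
-- ===== SOURCE A (Python) =====
-- from typing import Any, Iterable, Iterator, List, Optional, Tuple, Type
--
-- def _collect_arguments(arguments: Iterable[str]) -> Iterator[str]:
--     """Combine argument lines to obtain one line per argument"""
--     res = ""
--     for arg in arguments:
--         if res and arg[:6].strip().startswith("-"):
--             yield res.strip()
--             res = ""
--         res += f"\n   {arg.strip()}"
--     if res:
--         yield res.strip()
-- ===== SOURCE B (Python) =====
-- def _collect_arguments(arguments):
--     """Combine argument lines to obtain one line per argument.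
--
--     Group-then-join decomposition: materialize the lines, split them into
--     groups (a new group starts at every line whose first 6 chars, stripped,
--     start with '-'), then emit each group as the '\n   '-join of its
--     stripped lines, stripped.
--     """
--     args = list(arguments)
--     n = len(args)
--
--     def _starts_new(arg):
--         return arg[:6].strip().startswith("-")
--
--     i = 0
--     while i < n:
--         j = i + 1
--         while j < n and not _starts_new(args[j]):
--             j += 1
--         yield "\n   ".join(a.strip() for a in args[i:j]).strip()
--         i = j
-- ===== Notes on version B (the rewrite author's own statement) =====
-- stated objective: alternative
-- what changed: A interleaves a growing string accumulator with yields in one loop; B instead splits the lines into groups at boundary lines (first 6 chars stripped start with '-') and emits each group as the '\n '-join of its stripped lines, stripped.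
import Mathlib
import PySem

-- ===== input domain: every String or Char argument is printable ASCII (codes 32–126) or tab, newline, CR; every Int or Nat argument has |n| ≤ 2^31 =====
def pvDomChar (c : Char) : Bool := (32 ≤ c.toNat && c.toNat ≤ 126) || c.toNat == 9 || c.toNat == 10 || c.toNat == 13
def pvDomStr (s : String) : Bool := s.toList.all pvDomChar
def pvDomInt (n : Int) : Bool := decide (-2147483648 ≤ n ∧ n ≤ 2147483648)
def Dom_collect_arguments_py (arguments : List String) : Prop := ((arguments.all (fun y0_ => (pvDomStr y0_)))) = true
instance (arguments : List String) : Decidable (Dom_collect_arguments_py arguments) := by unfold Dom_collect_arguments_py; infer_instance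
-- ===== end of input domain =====

-- B replaces A's interleaved string-accumulator-and-yield loop by a group-then-join
-- decomposition (split the lines into groups at boundary lines, then join each group);
-- objective: alternative structure, same cost.

-- ===== PORT A =====
-- "\n   " (the continuation separator) as a char list
def pvSep : List Char := ['\n', ' ', ' ', ' ']

-- arg[:6].strip().startswith("-")
def pvIsStart (arg : String) : Bool :=
  PySem.Chars.startswith (PySem.Chars.strip (PySem.Chars.slice arg.toList none (some 6))) ['-']

-- one iteration of A's loop; state = (res as chars, yielded lines)
def pvStepA (st : List Char × List String) (arg : String) : List Char × List String :=
  let st' := if st.1 ≠ [] ∧ pvIsStart arg = true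
             then ([], st.2 ++ [String.ofList (PySem.Chars.strip st.1)])
             else st
  (st'.1 ++ pvSep ++ PySem.Chars.strip arg.toList, st'.2)

-- the trailing "if res: yield res.strip()"
def pvFinishA (st : List Char × List String) : List String :=
  if st.1 ≠ [] then st.2 ++ [String.ofList (PySem.Chars.strip st.1)] else st.2

def collect_arguments_py (arguments : List String) : List String :=
  pvFinishA (arguments.foldl pvStepA ([], []))

-- ===== PORT B =====
-- "\n   ".join(a.strip() for a in group).strip()
def pvEmit (g : List String) : String :=
  String.ofList (PySem.Chars.strip
    (PySem.Chars.join pvSep (g.map (fun a => PySem.Chars.strip a.toList))))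

-- Source B's outer while loop: peel one group (head line plus the following
-- non-boundary lines), emit it, recurse on the rest
def collect_arguments_py_alt (arguments : List String) : List String :=
  match arguments with
  | [] => []
  | a :: rest =>
      pvEmit (a :: rest.takeWhile (fun b => !pvIsStart b)) ::
        collect_arguments_py_alt (rest.dropWhile (fun b => !pvIsStart b))
termination_by arguments.length
decreasing_by
  have := List.length_dropWhile_le (fun b => !pvIsStart b) rest
  simp only [List.length_cons]; omega

-- ===== PRECONDITION & SPEC =====
def Spec_collect_arguments_py (arguments : List String) (out : List String) : Prop := out = collect_arguments_py_alt arguments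
instance (arguments : List String) (out : List String) : Decidable (Spec_collect_arguments_py arguments out) := by unfold Spec_collect_arguments_py; infer_instance

-- ===== CLAIM (what is proved, stated in full; the proofs are below) =====
def Claim_equal_collect_arguments_py : Prop := ∀ (arguments : List String), Dom_collect_arguments_py arguments → Spec_collect_arguments_py arguments (collect_arguments_py arguments)

-- ===== LEMMAS AND PROOFS =====

-- res as A accumulates it while the lines of g form the current group
def pvAcc (g : List String) : List Char :=
  (g.map (fun a => pvSep ++ PySem.Chars.strip a.toList)).flatten

-- what A's loop will still yield, given the pending res and remaining lines
def pvEmitFrom (res : List Char) (xs : List String) : List String :=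
  match xs with
  | [] => [String.ofList (PySem.Chars.strip res)]
  | a :: t =>
      if pvIsStart a then
        String.ofList (PySem.Chars.strip res) :: pvEmitFrom (pvSep ++ PySem.Chars.strip a.toList) t
      else
        pvEmitFrom (res ++ pvSep ++ PySem.Chars.strip a.toList) t

theorem pvFoldA_eq_emitFrom (xs : List String) :
    ∀ (res : List Char) (out : List String), res ≠ [] →
      pvFinishA (xs.foldl pvStepA (res, out)) = out ++ pvEmitFrom res xs := by
  induction xs with
  | nil => intro res out hres; simp [pvFinishA, pvEmitFrom, hres]
  | cons a t ih =>
      intro res out hres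
      simp only [List.foldl_cons, pvEmitFrom]
      by_cases h : pvIsStart a
      · rw [show pvStepA (res, out) a
              = ([] ++ pvSep ++ PySem.Chars.strip a.toList,
                 out ++ [String.ofList (PySem.Chars.strip res)]) by
            simp [pvStepA, hres, h]]
        rw [ih _ _ (by simp [pvSep])]
        simp [h, pvSep]
      · rw [show pvStepA (res, out) a = (res ++ pvSep ++ PySem.Chars.strip a.toList, out) by
            simp [pvStepA, h]]
        rw [ih _ _ (by simp [hres])]
        simp [h]

theorem pvStrip_sep_append (x : List Char) :
    PySem.Chars.strip (pvSep ++ x) = PySem.Chars.strip x := by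
  have h : List.dropWhile PySem.Chars.isspace (pvSep ++ x)
      = List.dropWhile PySem.Chars.isspace x := by
    simp [pvSep, PySem.Chars.isspace]
  simp [PySem.Chars.strip, PySem.Chars.lstrip, h]

theorem pvAcc_eq_sep_join (g : List String) (hg : g ≠ []) :
    pvAcc g = pvSep ++ PySem.Chars.join pvSep (g.map (fun a => PySem.Chars.strip a.toList)) := by
  induction g with
  | nil => exact absurd rfl hg
  | cons a t ih =>
      cases t with
      | nil => simp [pvAcc, PySem.Chars.join_singleton]
      | cons b u =>
          simp only [List.map_cons] at ih ⊢
          rw [PySem.Chars.join_cons_cons]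
          have := ih (by simp)
          simp only [pvAcc, List.map_cons, List.flatten_cons] at this ⊢
          rw [this]
          simp

theorem pvStrip_acc (g : List String) (hg : g ≠ []) :
    String.ofList (PySem.Chars.strip (pvAcc g)) = pvEmit g := by
  rw [pvAcc_eq_sep_join g hg, pvEmit, pvStrip_sep_append]

theorem pvEmitFrom_acc (t : List String) :
    ∀ (g : List String), g ≠ [] →
      pvEmitFrom (pvAcc g) t
        = pvEmit (g ++ t.takeWhile (fun b => !pvIsStart b)) ::
            collect_arguments_py_alt (t.dropWhile (fun b => !pvIsStart b)) := by
  induction t with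
  | nil => intro g hg; simp [pvEmitFrom, pvStrip_acc g hg, collect_arguments_py_alt]
  | cons a t ih =>
      intro g hg
      by_cases h : pvIsStart a
      · simp only [pvEmitFrom, if_pos trivial, List.takeWhile_cons, List.dropWhile_cons,
          Bool.not_true, h]
        rw [show pvSep ++ PySem.Chars.strip a.toList = pvAcc [a] by simp [pvAcc]]
        rw [ih [a] (by simp)]
        simp [pvStrip_acc g hg, collect_arguments_py_alt]
      · simp only [pvEmitFrom, h, List.takeWhile_cons, List.dropWhile_cons,
          Bool.not_eq_eq_eq_not, Bool.not_true]
        rw [show pvAcc g ++ pvSep ++ PySem.Chars.strip a.toList = pvAcc (g ++ [a]) by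
          simp [pvAcc, List.append_assoc]]
        rw [ih (g ++ [a]) (by simp)]
        simp

-- ===== VERDICT (by name: the statement is the Claim_ definition above) =====
theorem collect_arguments_py_spec : Claim_equal_collect_arguments_py := by
  intro args _hdom
  unfold Spec_collect_arguments_py
  cases args with
  | nil => simp [collect_arguments_py, pvFinishA, collect_arguments_py_alt]
  | cons a t =>
      show pvFinishA ((a :: t).foldl pvStepA ([], [])) = _
      simp only [List.foldl_cons]
      rw [show pvStepA ([], []) a = ([] ++ pvSep ++ PySem.Chars.strip a.toList, []) by
        simp [pvStepA]]
      rw [pvFoldA_eq_emitFrom t _ _ (by simp [pvSep])]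
      rw [show ([] : List Char) ++ pvSep ++ PySem.Chars.strip a.toList = pvAcc [a] by
        simp [pvAcc]]
      rw [pvEmitFrom_acc t [a] (by simp)]
      simp [collect_arguments_py_alt]
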